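-- pv_equiv track=rewrite | github.com/aldairwontroba/Predict_Pleno | utilitarios/extracao de dat/hunt_dolm2_window.py | guess_broker
-- ===== SOURCE A (Python) =====
-- def guess_broker(varints_field, ascii_field):
--     # heurística simples:
--     # 1) Se houver "1537@+??,b2" logo após tags conhecidas (4098/11010/8578), pegue algum número ASCII próximo (1..1000) como broker
--     # 2) Se não, pegue o menor número ASCII de 1..200 que esteja relativamente perto do token.
--     #    (ajuste depois, quando o padrão do campo "corretora" ficar claro)
--     ints = varints_field.split()
--     tags = set()
--     for it in ints:
--         v = it.split('@',1)[0]
--         try: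
--             tags.add(int(v))
--         except:
--             pass
--
--     # fallback por proximidade
--     cand=[]
--     for token in ascii_field.split():
--         if '@' not in token: continue
--         val, off = token.split('@', 1)
--         if val.isdigit():
--             n=int(val)
--             if 1 <= n <= 1000:
--                 try:
--                     offi = int(off)
--                 except:
--                     offi = 0
--                 cand.append((abs(offi), n))
--     if not cand: return None
--     cand.sort()
--     return cand[0][1]
-- ===== SOURCE B (Python) =====
-- def guess_broker(varints_field, ascii_field):
--     # Single pass over ascii_field.split() keeping the running lexicographic
--     # minimum of (abs(offset), n); the varints/tags loop of the original is
--     # dead code and is dropped.  Same filters, same result.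
--     best = None
--     for token in ascii_field.split():
--         if '@' not in token:
--             continue
--         val, off = token.split('@', 1)
--         if not val.isdigit():
--             continue
--         n = int(val)
--         if not (1 <= n <= 1000):
--             continue
--         try:
--             offi = int(off)
--         except ValueError:
--             offi = 0
--         c = (abs(offi), n)
--         if best is None or c < best:
--             best = c
--     return None if best is None else best[1]
-- ===== Notes on version B (the rewrite author's own statement) =====
-- stated objective: simpler
-- what changed: Dropped the dead tags/varints loop and replaced build-list-then-sort-then-index with a single pass keeping the running lexicographic minimum (abs(offset), n).
import Mathlib
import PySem

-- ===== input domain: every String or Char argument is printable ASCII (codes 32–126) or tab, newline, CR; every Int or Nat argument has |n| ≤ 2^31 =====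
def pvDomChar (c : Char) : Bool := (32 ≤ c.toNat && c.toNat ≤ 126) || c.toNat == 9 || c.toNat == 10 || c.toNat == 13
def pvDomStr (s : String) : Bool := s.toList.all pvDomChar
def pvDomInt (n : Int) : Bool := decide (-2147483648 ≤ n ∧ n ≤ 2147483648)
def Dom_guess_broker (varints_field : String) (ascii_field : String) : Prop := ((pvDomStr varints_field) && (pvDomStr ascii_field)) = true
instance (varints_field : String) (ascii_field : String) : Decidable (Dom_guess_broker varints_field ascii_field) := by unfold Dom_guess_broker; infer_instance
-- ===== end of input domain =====

-- B drops A's dead tags/varints loop and replaces build-list-sort-index by a single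
-- running-lexicographic-minimum pass; return values proved equal on all inputs.


-- ===== PORT A =====
def guess_broker (varints_field : String) (ascii_field : String) : Option Int :=
  let ints := PySem.Str.split₀ varints_field
  -- tags loop (dead code in A, ported faithfully): int(it.split('@',1)[0]) added unless ValueError
  let _tags : PySem.Set Int := ints.foldl (fun tags it =>
    match PySem.Str.splitMax? it "@" 1 with
    | some (v :: _) =>
      match PySem.Int.ofStr? v with
      | some t => PySem.Set.add tags t
      | none => tags
    | _ => tags) PySem.Set.empty
  let cand : List (Int × Int) := (PySem.Str.split₀ ascii_field).foldl (fun cand token =>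
    if PySem.Str.isIn "@" token then
      match PySem.Str.splitMax? token "@" 1 with
      | some (val :: off :: _) =>
        if PySem.Str.strIsdigit val then
          let n := (PySem.Int.ofStr? val).getD 0  -- int(val): always parses, val is all digits
          if 1 ≤ n ∧ n ≤ 1000 then
            let offi := (PySem.Int.ofStr? off).getD 0  -- try int(off) except: offi = 0
            cand ++ [(|offi|, n)]
          else cand
        else cand
      | _ => cand  -- unreachable: '@' ∈ token gives two pieces
    else cand) []
  if cand.isEmpty then none
  else (PySem.List.pyGet? (PySem.List.sorted2 cand (·.1) (·.2)) 0).map (·.2)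

-- ===== PORT B =====
def guess_broker_alt (varints_field : String) (ascii_field : String) : Option Int :=
  let best : Option (Int × Int) := (PySem.Str.split₀ ascii_field).foldl (fun best token =>
    if PySem.Str.isIn "@" token then
      -- val, off = token.split('@', 1): '@' in token, so exactly two pieces
      match (PySem.Str.splitMax? token "@" 1).getD [] with
      | [] => best
      | [_] => best
      | val :: off :: _ =>
        if PySem.Str.strIsdigit val then
          let n := (PySem.Int.ofStr? val).getD 0  -- int(val): always parses, val is all digits
          if 1 ≤ n ∧ n ≤ 1000 then
            let offi := (PySem.Int.ofStr? off).getD 0  -- try int(off) except ValueError: offi = 0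
            let c := (|offi|, n)
            -- if best is None or c < best: best = c   (tuple '<' is lexicographic)
            if (best.map (fun b => decide (c.1 < b.1 ∨ (c.1 = b.1 ∧ c.2 < b.2)))).getD true
            then some c else best
          else best
        else best
    else best) none
  best.map (·.2)

-- ===== PRECONDITION & SPEC =====
def Spec_guess_broker (varints_field : String) (ascii_field : String) (out : Option Int) : Prop := out = guess_broker_alt varints_field ascii_field
instance (varints_field : String) (ascii_field : String) (out : Option Int) : Decidable (Spec_guess_broker varints_field ascii_field out) := by unfold Spec_guess_broker; infer_instance

-- ===== CLAIM (what is proved, stated in full; the proofs are below) =====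
def Claim_equal_guess_broker : Prop := ∀ (varints_field : String) (ascii_field : String), Dom_guess_broker varints_field ascii_field → Spec_guess_broker varints_field ascii_field (guess_broker varints_field ascii_field)

-- ===== LEMMAS AND PROOFS =====

-- the candidate a token contributes, shared shape of both loops
def pvCand (token : String) : Option (Int × Int) :=
  if PySem.Str.isIn "@" token then
    match PySem.Str.splitMax? token "@" 1 with
    | some (val :: off :: _) =>
      if PySem.Str.strIsdigit val then
        let n := (PySem.Int.ofStr? val).getD 0
        if 1 ≤ n ∧ n ≤ 1000 then some (|(PySem.Int.ofStr? off).getD 0|, n)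
        else none
      else none
    | _ => none
  else none

def pvMinStep (b : Option (Int × Int)) (c : Int × Int) : Option (Int × Int) :=
  match b with
  | none => some c
  | some b => if c.1 < b.1 ∨ (c.1 = b.1 ∧ c.2 < b.2) then some c else some b

theorem pvAstep_eq (acc : List (Int × Int)) (t : String) :
    (if PySem.Str.isIn "@" t then
      match PySem.Str.splitMax? t "@" 1 with
      | some (val :: off :: _) =>
        if PySem.Str.strIsdigit val then
          let n := (PySem.Int.ofStr? val).getD 0
          if 1 ≤ n ∧ n ≤ 1000 then
            let offi := (PySem.Int.ofStr? off).getD 0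
            acc ++ [(|offi|, n)]
          else acc
        else acc
      | _ => acc
    else acc)
    = (match pvCand t with | none => acc | some c => acc ++ [c]) := by
  unfold pvCand
  split
  · split <;> try rfl
    rename_i val off rest _
    by_cases hd : PySem.Str.strIsdigit val <;> simp only [hd, if_true, if_false, Bool.false_eq_true]
    by_cases hn : 1 ≤ (PySem.Int.ofStr? val).getD 0 ∧ (PySem.Int.ofStr? val).getD 0 ≤ 1000 <;>
      simp [hn]
  · rfl

theorem pvBstep_eq (b : Option (Int × Int)) (t : String) :
    (if PySem.Str.isIn "@" t then
      match (PySem.Str.splitMax? t "@" 1).getD [] with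
      | [] => b
      | [_] => b
      | val :: off :: _ =>
        if PySem.Str.strIsdigit val then
          let n := (PySem.Int.ofStr? val).getD 0
          if 1 ≤ n ∧ n ≤ 1000 then
            let offi := (PySem.Int.ofStr? off).getD 0
            let c := (|offi|, n)
            if (b.map (fun bb => decide (c.1 < bb.1 ∨ (c.1 = bb.1 ∧ c.2 < bb.2)))).getD true
            then some c else b
          else b
        else b
    else b)
    = (match pvCand t with | none => b | some c => pvMinStep b c) := by
  unfold pvCand
  by_cases h1 : PySem.Str.isIn "@" t <;>
    simp only [h1, if_true, if_false, Bool.false_eq_true]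
  cases h2 : PySem.Str.splitMax? t "@" 1 with
  | none => rfl
  | some l =>
    match l with
    | [] => rfl
    | [_] => rfl
    | val :: off :: rest =>
      by_cases hd : PySem.Str.strIsdigit val <;>
        simp only [Option.getD_some, hd, if_true, if_false, Bool.false_eq_true]
      by_cases hn : 1 ≤ (PySem.Int.ofStr? val).getD 0 ∧ (PySem.Int.ofStr? val).getD 0 ≤ 1000
      · cases b <;> simp [hn, pvMinStep]
      · simp [hn]

theorem pvFoldA (l : List String) (acc : List (Int × Int)) :
    l.foldl (fun acc t => match pvCand t with | none => acc | some c => acc ++ [c]) acc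
      = acc ++ l.filterMap pvCand := by
  induction l generalizing acc with
  | nil => simp
  | cons h t ih =>
    cases hc : pvCand h <;> simp [hc, ih]

theorem pvFoldB (l : List String) (b : Option (Int × Int)) :
    l.foldl (fun b t => match pvCand t with | none => b | some c => pvMinStep b c) b
      = (l.filterMap pvCand).foldl pvMinStep b := by
  induction l generalizing b with
  | nil => rfl
  | cons h t ih =>
    cases hc : pvCand h <;> simp [hc, ih]

theorem pvHead?_insertBy (before : (Int × Int) → (Int × Int) → Bool) (x : Int × Int)
    (ys : List (Int × Int)) :
    (PySem.List.insertBy before x ys).head?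
      = some (match ys.head? with | none => x | some y => if before x y then x else y) := by
  cases ys with
  | nil => rfl
  | cons y ys => by_cases h : before x y <;> simp [PySem.List.insertBy, h]

theorem pvHead?_foldl_insertBy (before : (Int × Int) → (Int × Int) → Bool)
    (l : List (Int × Int)) (acc : List (Int × Int)) :
    (l.foldl (fun acc x => PySem.List.insertBy before x acc) acc).head?
      = l.foldl (fun b c => some (match b with | none => c | some y => if before c y then c else y))
          acc.head? := by
  induction l generalizing acc with
  | nil => rfl
  | cons x l ih =>
    simp only [List.foldl_cons]
    rw [ih, pvHead?_insertBy]

theorem pvMin_eq (cand : List (Int × Int)) :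
    (PySem.List.sorted2 cand (·.1) (·.2)).head? = cand.foldl pvMinStep none := by
  unfold PySem.List.sorted2
  simp only [if_neg (by decide : ¬ (false = true))]
  rw [pvHead?_foldl_insertBy]
  have : (List.head? ([] : List (Int × Int))) = (none : Option (Int × Int)) := rfl
  rw [this]
  apply PySem.List.foldl_congr_mem
  intro b c _
  cases b with
  | none => rfl
  | some y =>
    show some (if (decide (c.1 < y.1) || !decide (y.1 < c.1) && decide (c.2 < y.2)) = true then c else y)
        = if c.1 < y.1 ∨ (c.1 = y.1 ∧ c.2 < y.2) then some c else some y
    have hiff : (decide (c.1 < y.1) || (!decide (y.1 < c.1) && decide (c.2 < y.2))) = true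
        ↔ (c.1 < y.1 ∨ (c.1 = y.1 ∧ c.2 < y.2)) := by
      simp only [Bool.or_eq_true, Bool.and_eq_true, Bool.not_eq_true', decide_eq_true_iff,
        decide_eq_false_iff_not]
      omega
    by_cases h : c.1 < y.1 ∨ (c.1 = y.1 ∧ c.2 < y.2)
    · rw [if_pos (hiff.mpr h), if_pos h]
    · rw [if_neg (fun hb => h (hiff.mp hb)), if_neg h]

-- ===== VERDICT (by name: the statement is the Claim_ definition above) =====
theorem guess_broker_spec : Claim_equal_guess_broker := by
  intro v a _
  show guess_broker v a = guess_broker_alt v a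
  unfold guess_broker guess_broker_alt
  simp only []
  have hA : ∀ l : List String, ∀ acc : List (Int × Int),
      l.foldl (fun cand token =>
        if PySem.Str.isIn "@" token then
          match PySem.Str.splitMax? token "@" 1 with
          | some (val :: off :: _) =>
            if PySem.Str.strIsdigit val then
              let n := (PySem.Int.ofStr? val).getD 0
              if 1 ≤ n ∧ n ≤ 1000 then
                let offi := (PySem.Int.ofStr? off).getD 0
                cand ++ [(|offi|, n)]
              else cand
            else cand
          | _ => cand
        else cand) acc
      = acc ++ l.filterMap pvCand := by
    intro l acc
    rw [← pvFoldA l acc]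
    apply PySem.List.foldl_congr_mem
    intro acc t _
    exact pvAstep_eq acc t
  have hB : ∀ l : List String, ∀ b : Option (Int × Int),
      l.foldl (fun best token =>
        if PySem.Str.isIn "@" token then
          match (PySem.Str.splitMax? token "@" 1).getD [] with
          | [] => best
          | [_] => best
          | val :: off :: _ =>
            if PySem.Str.strIsdigit val then
              let n := (PySem.Int.ofStr? val).getD 0
              if 1 ≤ n ∧ n ≤ 1000 then
                let offi := (PySem.Int.ofStr? off).getD 0
                let c := (|offi|, n)
                if (best.map (fun bb => decide (c.1 < bb.1 ∨ (c.1 = bb.1 ∧ c.2 < bb.2)))).getD true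
                then some c else best
              else best
            else best
        else best) b
      = (l.filterMap pvCand).foldl pvMinStep b := by
    intro l b
    rw [← pvFoldB l b]
    apply PySem.List.foldl_congr_mem
    intro b t _
    exact pvBstep_eq b t
  rw [hA, hB]
  set cand := (PySem.Str.split₀ a).filterMap pvCand with hcand
  cases hc : cand with
  | nil => simp
  | cons c0 cs =>
    simp only [List.nil_append, List.isEmpty_cons, Bool.false_eq_true, if_false]
    rw [PySem.List.pyGet?_zero, ← List.head?_eq_getElem?, pvMin_eq]
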